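-- pv_equiv track=rewrite | github.com/pranjali0307/YatraMind | API/app.py | clean_category
-- ===== SOURCE A (Python) =====
-- def clean_category(cat):
--
--     cat = str(cat).lower()
--
--     if any(word in cat for word in [
--         "fort","palace","monument","museum",
--         "heritage","historical","tomb"
--     ]):
--         return "Historical"
--
--     elif any(word in cat for word in [
--         "temple","mosque","church","gurudwara"
--     ]):
--         return "Religious"
--
--     elif any(word in cat for word in [
--         "wildlife","sanctuary","national park","zoo"
--     ]):
--         return "Wildlife"
--
--     elif any(word in cat for word in [
--         "lake","waterfall","garden","park","nature"
--     ]):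
--         return "Nature"
--
--     elif any(word in cat for word in [
--         "trek","rafting","paragliding",
--         "ski","camp","hiking","adventure"
--     ]):
--         return "Adventure"
--
--     elif "beach" in cat:
--         return "Beach"
--
--     elif any(word in cat for word in [
--         "hill","mountain"
--     ]):
--         return "Hill Station"
--
--     else:
--         return "Tourist"
-- ===== SOURCE B (Python) =====
-- _RANK = {
--     "fort": 0, "palace": 0, "monument": 0, "museum": 0,
--     "heritage": 0, "historical": 0, "tomb": 0,
--     "temple": 1, "mosque": 1, "church": 1, "gurudwara": 1,
--     "wildlife": 2, "sanctuary": 2, "national park": 2, "zoo": 2,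
--     "lake": 3, "waterfall": 3, "garden": 3, "park": 3, "nature": 3,
--     "trek": 4, "rafting": 4, "paragliding": 4,
--     "ski": 4, "camp": 4, "hiking": 4, "adventure": 4,
--     "beach": 5,
--     "hill": 6, "mountain": 6,
-- }
-- _LABELS = ["Historical", "Religious", "Wildlife", "Nature",
--            "Adventure", "Beach", "Hill Station", "Tourist"]
--
-- def clean_category(cat):
--     # min-reduction over ALL matching keywords instead of a first-match cascade:
--     # every keyword carries a priority rank; the answer is the label of the
--     # smallest rank among matches (default: last slot, "Tourist").
--     cat = str(cat).lower()
--     best = len(_LABELS) - 1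
--     for word, rank in _RANK.items():
--         if word in cat:
--             best = min(best, rank)
--     return _LABELS[best]
-- ===== Notes on version B (the rewrite author's own statement) =====
-- stated objective: alternative
-- what changed: Replaces the first-match if/elif cascade with a min-reduction: every keyword carries a numeric priority rank, one pass over all keywords takes the minimum rank among matches, and the answer is that rank's label.
import Mathlib
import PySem

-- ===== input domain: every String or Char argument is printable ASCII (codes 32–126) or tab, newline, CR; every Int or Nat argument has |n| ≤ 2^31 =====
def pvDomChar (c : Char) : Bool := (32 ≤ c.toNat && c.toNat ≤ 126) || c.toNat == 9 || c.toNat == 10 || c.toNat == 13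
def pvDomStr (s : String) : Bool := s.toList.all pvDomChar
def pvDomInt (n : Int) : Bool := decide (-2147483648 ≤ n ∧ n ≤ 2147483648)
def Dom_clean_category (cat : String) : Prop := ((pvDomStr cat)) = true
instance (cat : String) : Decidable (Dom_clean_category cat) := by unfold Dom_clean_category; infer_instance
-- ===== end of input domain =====

-- B replaces A's first-match if/elif cascade by a min-reduction over ranked keywords (alternative decomposition, same cost).

-- ===== PORT A =====
def clean_category (cat : String) : String :=
  let cat := PySem.Str.lower cat
  if ["fort", "palace", "monument", "museum",
      "heritage", "historical", "tomb"].any (fun word => PySem.Str.isIn word cat) then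
    "Historical"
  else if ["temple", "mosque", "church", "gurudwara"].any (fun word => PySem.Str.isIn word cat) then
    "Religious"
  else if ["wildlife", "sanctuary", "national park", "zoo"].any (fun word => PySem.Str.isIn word cat) then
    "Wildlife"
  else if ["lake", "waterfall", "garden", "park", "nature"].any (fun word => PySem.Str.isIn word cat) then
    "Nature"
  else if ["trek", "rafting", "paragliding",
           "ski", "camp", "hiking", "adventure"].any (fun word => PySem.Str.isIn word cat) then
    "Adventure"
  else if PySem.Str.isIn "beach" cat then
    "Beach"
  else if ["hill", "mountain"].any (fun word => PySem.Str.isIn word cat) then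
    "Hill Station"
  else
    "Tourist"

-- ===== PORT B =====
-- _RANK: keyword -> priority rank, in Source B's insertion order
def pvRank_clean_category : List (String × Nat) :=
  [("fort", 0), ("palace", 0), ("monument", 0), ("museum", 0),
   ("heritage", 0), ("historical", 0), ("tomb", 0),
   ("temple", 1), ("mosque", 1), ("church", 1), ("gurudwara", 1),
   ("wildlife", 2), ("sanctuary", 2), ("national park", 2), ("zoo", 2),
   ("lake", 3), ("waterfall", 3), ("garden", 3), ("park", 3), ("nature", 3),
   ("trek", 4), ("rafting", 4), ("paragliding", 4),
   ("ski", 4), ("camp", 4), ("hiking", 4), ("adventure", 4),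
   ("beach", 5),
   ("hill", 6), ("mountain", 6)]

def pvLabels_clean_category : List String :=
  ["Historical", "Religious", "Wildlife", "Nature",
   "Adventure", "Beach", "Hill Station", "Tourist"]

def clean_category_alt (cat : String) : String :=
  let cat := PySem.Str.lower cat
  let best := pvRank_clean_category.foldl
    (fun best p => if PySem.Str.isIn p.1 cat then min best p.2 else best)
    (pvLabels_clean_category.length - 1)
  -- _LABELS[best]: best ≤ 7 always, so the index is in range and the default is never used
  pvLabels_clean_category.getD best "Tourist"

-- ===== PRECONDITION & SPEC =====
def Spec_clean_category (cat : String) (out : String) : Prop := out = clean_category_alt cat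
instance (cat : String) (out : String) : Decidable (Spec_clean_category cat out) := by unfold Spec_clean_category; infer_instance

-- ===== CLAIM (what is proved, stated in full; the proofs are below) =====
def Claim_equal_clean_category : Prop := ∀ (cat : String), Dom_clean_category cat → Spec_clean_category cat (clean_category cat)

-- ===== LEMMAS AND PROOFS =====
-- folding a block of keywords that all carry the same rank r is: 'min b r' if any matched, else 'b'
theorem pv_fold_const_rank (cat : String) (ws : List String) (r b : Nat) :
    (ws.map (fun w => (w, r))).foldl
        (fun best p => if PySem.Str.isIn p.1 cat then min best p.2 else best) b
      = if ws.any (fun w => PySem.Str.isIn w cat) then min b r else b := by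
  induction ws generalizing b with
  | nil => simp
  | cons w ws ih =>
    simp only [List.map_cons, List.foldl_cons, List.any_cons]
    rw [ih]
    by_cases h : PySem.Str.isIn w cat = true <;>
      by_cases h2 : (ws.any fun w => PySem.Str.isIn w cat) = true
    · rw [if_pos h2, if_pos h, if_pos (by rw [h]; rfl)]; omega
    · rw [if_neg h2, if_pos h, if_pos (by rw [h]; rfl)]
    · rw [if_pos h2, if_neg h, if_pos (by rw [h2, Bool.or_true])]
    · rw [if_neg h2, if_neg h, if_neg (by simp only [Bool.or_eq_true]; tauto)]

-- the flat ranked list is the concatenation of seven constant-rank blocks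
theorem pv_rank_split :
    pvRank_clean_category =
      (["fort", "palace", "monument", "museum",
        "heritage", "historical", "tomb"].map (fun w => (w, 0)))
      ++ (["temple", "mosque", "church", "gurudwara"].map (fun w => (w, 1)))
      ++ (["wildlife", "sanctuary", "national park", "zoo"].map (fun w => (w, 2)))
      ++ (["lake", "waterfall", "garden", "park", "nature"].map (fun w => (w, 3)))
      ++ (["trek", "rafting", "paragliding",
           "ski", "camp", "hiking", "adventure"].map (fun w => (w, 4)))
      ++ (["beach"].map (fun w => (w, 5)))
      ++ (["hill", "mountain"].map (fun w => (w, 6))) := rfl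

theorem clean_category_eq_alt (cat : String) : clean_category cat = clean_category_alt cat := by
  simp only [clean_category, clean_category_alt, pv_rank_split,
    List.foldl_append, pv_fold_const_rank, pvLabels_clean_category]
  rw [show ∀ c, (["beach"].any fun w => PySem.Str.isIn w c) = PySem.Str.isIn "beach" c
      from fun c => by simp]
  generalize (["fort", "palace", "monument", "museum",
    "heritage", "historical", "tomb"].any (fun w => PySem.Str.isIn w (PySem.Str.lower cat))) = g0
  generalize (["temple", "mosque", "church", "gurudwara"].any
    (fun w => PySem.Str.isIn w (PySem.Str.lower cat))) = g1
  generalize (["wildlife", "sanctuary", "national park", "zoo"].any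
    (fun w => PySem.Str.isIn w (PySem.Str.lower cat))) = g2
  generalize (["lake", "waterfall", "garden", "park", "nature"].any
    (fun w => PySem.Str.isIn w (PySem.Str.lower cat))) = g3
  generalize (["trek", "rafting", "paragliding",
    "ski", "camp", "hiking", "adventure"].any (fun w => PySem.Str.isIn w (PySem.Str.lower cat))) = g4
  generalize (PySem.Str.isIn "beach" (PySem.Str.lower cat)) = g5
  generalize (["hill", "mountain"].any (fun w => PySem.Str.isIn w (PySem.Str.lower cat))) = g6
  revert g0 g1 g2 g3 g4 g5 g6
  decide

-- ===== VERDICT (by name: the statement is the Claim_ definition above) =====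
theorem clean_category_spec : Claim_equal_clean_category := by
  intro cat _
  exact clean_category_eq_alt cat
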